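-- pv_equiv track=rewrite | github.com/Nithishkumar9252/SkyNetOps | skynetops.py | render_alerts_html
-- ===== SOURCE A (Python) =====
-- from typing import List, Optional, Tuple, Dict, Any
--
-- def html_escape(s: str) -> str:
--     if s is None:
--         return ""
--     s = str(s)
--     return (
--         s.replace("&", "&amp;")
--          .replace("<", "&lt;")
--          .replace(">", "&gt;")
--          .replace('"', "&quot;")
--          .replace("'", "&#39;")
--     )
--
-- def render_alerts_html(alerts: List[Dict[str, str]]) -> str:
--     if not alerts:
--         return "<p style='color:#6b7280;'>No triggered alerts in this cycle.</p>"
--     head = (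
--         "<table width='100%' cellpadding='0' cellspacing='0' style='border-collapse:collapse; border:1px solid #e5e7eb;' bgcolor='#ffffff'>"
--         "<thead><tr style='background:#f3f4f6;' bgcolor='#f3f4f6'>"
--         "<th align='left' style='padding:8px;'>Time (UTC)</th>"
--         "<th align='left' style='padding:8px;'>Metric</th>"
--         "<th align='left' style='padding:8px;'>Value</th>"
--         "<th align='left' style='padding:8px;'>Threshold</th>"
--         "<th align='left' style='padding:8px;'>Severity</th>"
--         "<th align='left' style='padding:8px;'>Note</th>"
--         "</tr></thead><tbody>"
--     )
--     rows = []
--     for a in alerts: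
--         rows.append(
--             "<tr>"
--             f"<td style='padding:8px; border-bottom:1px solid #e5e7eb;'>{html_escape(a.get('when',''))}</td>"
--             f"<td style='padding:8px; border-bottom:1px solid #e5e7eb;'>{html_escape(a.get('metric',''))}</td>"
--             f"<td style='padding:8px; border-bottom:1px solid #e5e7eb;'>{html_escape(a.get('value',''))}</td>"
--             f"<td style='padding:8px; border-bottom:1px solid #e5e7eb;'>{html_escape(a.get('threshold',''))}</td>"
--             f"<td style='padding:8px; border-bottom:1px solid #e5e7eb; color:#b91c1c;'>{html_escape(a.get('severity','-'))}</td>"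
--             f"<td style='padding:8px; border-bottom:1px solid #e5e7eb;'>{html_escape(a.get('note',''))}</td>"
--             "</tr>"
--         )
--     tail = "</tbody></table>"
--     return head + "".join(rows) + tail
-- ===== SOURCE B (Python) =====
-- from typing import List, Dict
--
-- # Column spec: (dict key, default value, extra inline style for the cell)
-- _COLS = [
--     ("when", "", ""),
--     ("metric", "", ""),
--     ("value", "", ""),
--     ("threshold", "", ""),
--     ("severity", "-", " color:#b91c1c;"),
--     ("note", "", ""),
-- ]
--
-- def _esc_char(ch: str) -> str:
--     if ch == "&":
--         return "&amp;"
--     elif ch == "<":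
--         return "&lt;"
--     elif ch == ">":
--         return "&gt;"
--     elif ch == '"':
--         return "&quot;"
--     elif ch == "'":
--         return "&#39;"
--     else:
--         return ch
--
-- def _escape(s: str) -> str:
--     # single pass over the characters instead of five chained str.replace passes
--     return "".join(_esc_char(ch) for ch in s)
--
-- def render_alerts_html(alerts: List[Dict[str, str]]) -> str:
--     if not alerts:
--         return "<p style='color:#6b7280;'>No triggered alerts in this cycle.</p>"
--     head = (
--         "<table width='100%' cellpadding='0' cellspacing='0' style='border-collapse:collapse; border:1px solid #e5e7eb;' bgcolor='#ffffff'>"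
--         "<thead><tr style='background:#f3f4f6;' bgcolor='#f3f4f6'>"
--         "<th align='left' style='padding:8px;'>Time (UTC)</th>"
--         "<th align='left' style='padding:8px;'>Metric</th>"
--         "<th align='left' style='padding:8px;'>Value</th>"
--         "<th align='left' style='padding:8px;'>Threshold</th>"
--         "<th align='left' style='padding:8px;'>Severity</th>"
--         "<th align='left' style='padding:8px;'>Note</th>"
--         "</tr></thead><tbody>"
--     )
--     out = [head]
--     for a in alerts:
--         out.append("<tr>")
--         for key, default, extra in _COLS:
--             out.append(
--                 "<td style='padding:8px; border-bottom:1px solid #e5e7eb;"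
--                 + extra + "'>" + _escape(a.get(key, default)) + "</td>"
--             )
--         out.append("</tr>")
--     out.append("</tbody></table>")
--     return "".join(out)
-- ===== Notes on version B (the rewrite author's own statement) =====
-- stated objective: idiomatic
-- what changed: Replaces the six hand-written per-column f-string cells with a data-driven column specification (key, default, extra style) iterated inside the row loop, and replaces the five chained str.replace passes of html_escape with a single per-character escaping pass.
import Mathlib
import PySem

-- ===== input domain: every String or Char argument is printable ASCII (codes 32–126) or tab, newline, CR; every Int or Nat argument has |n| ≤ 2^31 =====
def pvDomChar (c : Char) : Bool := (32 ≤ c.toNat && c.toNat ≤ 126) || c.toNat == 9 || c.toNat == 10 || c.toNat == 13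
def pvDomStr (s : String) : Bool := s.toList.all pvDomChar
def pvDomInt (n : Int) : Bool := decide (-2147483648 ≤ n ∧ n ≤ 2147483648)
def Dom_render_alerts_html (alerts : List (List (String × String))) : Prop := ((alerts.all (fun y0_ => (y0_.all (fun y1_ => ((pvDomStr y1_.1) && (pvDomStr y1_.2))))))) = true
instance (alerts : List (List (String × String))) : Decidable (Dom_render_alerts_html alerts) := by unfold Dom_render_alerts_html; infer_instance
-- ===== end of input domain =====

-- B replaces A's six hand-written per-column cells with a data-driven column spec and A's
-- five chained replace passes with one per-character escaping pass (objective: idiomatic).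

-- ===== PORT A =====
def html_escape (s : String) : String :=
  PySem.Str.replace (PySem.Str.replace (PySem.Str.replace (PySem.Str.replace
    (PySem.Str.replace s "&" "&amp;") "<" "&lt;") ">" "&gt;") "\"" "&quot;") "'" "&#39;"

def pvHead : String :=
  "<table width='100%' cellpadding='0' cellspacing='0' style='border-collapse:collapse; border:1px solid #e5e7eb;' bgcolor='#ffffff'>" ++
  "<thead><tr style='background:#f3f4f6;' bgcolor='#f3f4f6'>" ++
  "<th align='left' style='padding:8px;'>Time (UTC)</th>" ++
  "<th align='left' style='padding:8px;'>Metric</th>" ++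
  "<th align='left' style='padding:8px;'>Value</th>" ++
  "<th align='left' style='padding:8px;'>Threshold</th>" ++
  "<th align='left' style='padding:8px;'>Severity</th>" ++
  "<th align='left' style='padding:8px;'>Note</th>" ++
  "</tr></thead><tbody>"

def pvRowA (a : List (String × String)) : String :=
  "<tr>" ++
  "<td style='padding:8px; border-bottom:1px solid #e5e7eb;'>" ++ html_escape (PySem.Dict.getD ⟨a⟩ "when" "") ++ "</td>" ++
  "<td style='padding:8px; border-bottom:1px solid #e5e7eb;'>" ++ html_escape (PySem.Dict.getD ⟨a⟩ "metric" "") ++ "</td>" ++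
  "<td style='padding:8px; border-bottom:1px solid #e5e7eb;'>" ++ html_escape (PySem.Dict.getD ⟨a⟩ "value" "") ++ "</td>" ++
  "<td style='padding:8px; border-bottom:1px solid #e5e7eb;'>" ++ html_escape (PySem.Dict.getD ⟨a⟩ "threshold" "") ++ "</td>" ++
  "<td style='padding:8px; border-bottom:1px solid #e5e7eb; color:#b91c1c;'>" ++ html_escape (PySem.Dict.getD ⟨a⟩ "severity" "-") ++ "</td>" ++
  "<td style='padding:8px; border-bottom:1px solid #e5e7eb;'>" ++ html_escape (PySem.Dict.getD ⟨a⟩ "note" "") ++ "</td>" ++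
  "</tr>"

def render_alerts_html (alerts : List (List (String × String))) : String :=
  if alerts = [] then "<p style='color:#6b7280;'>No triggered alerts in this cycle.</p>"
  else
    pvHead ++
    PySem.Str.join "" (alerts.foldl (fun rows a => rows ++ [pvRowA a]) []) ++
    "</tbody></table>"

-- ===== PORT B =====
def pvHeadB : String :=
  "<table width='100%' cellpadding='0' cellspacing='0' style='border-collapse:collapse; border:1px solid #e5e7eb;' bgcolor='#ffffff'>" ++
  "<thead><tr style='background:#f3f4f6;' bgcolor='#f3f4f6'>" ++
  "<th align='left' style='padding:8px;'>Time (UTC)</th>" ++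
  "<th align='left' style='padding:8px;'>Metric</th>" ++
  "<th align='left' style='padding:8px;'>Value</th>" ++
  "<th align='left' style='padding:8px;'>Threshold</th>" ++
  "<th align='left' style='padding:8px;'>Severity</th>" ++
  "<th align='left' style='padding:8px;'>Note</th>" ++
  "</tr></thead><tbody>"

def pvCols : List (String × String × String) :=
  [("when", "", ""), ("metric", "", ""), ("value", "", ""),
   ("threshold", "", ""), ("severity", "-", " color:#b91c1c;"), ("note", "", "")]

def pvEscChar (c : Char) : String :=
  if c = '&' then "&amp;"
  else if c = '<' then "&lt;"
  else if c = '>' then "&gt;"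
  else if c = '"' then "&quot;"
  else if c = '\'' then "&#39;"
  else String.ofList [c]

def pvEscape (s : String) : String :=
  PySem.Str.join "" (s.toList.map pvEscChar)

def pvCell (a : List (String × String)) (col : String × String × String) : String :=
  "<td style='padding:8px; border-bottom:1px solid #e5e7eb;" ++ col.2.2 ++ "'>" ++
  pvEscape (PySem.Dict.getD ⟨a⟩ col.1 col.2.1) ++ "</td>"

def render_alerts_html_alt (alerts : List (List (String × String))) : String :=
  if alerts = [] then "<p style='color:#6b7280;'>No triggered alerts in this cycle.</p>"
  else
    PySem.Str.join ""
      ((alerts.foldl (fun out a => ((out ++ ["<tr>"]) ++ pvCols.map (pvCell a)) ++ ["</tr>"]) [pvHeadB]) ++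
       ["</tbody></table>"])

-- ===== PRECONDITION & SPEC =====
def Spec_render_alerts_html (alerts : List (List (String × String))) (out : String) : Prop := out = render_alerts_html_alt alerts
instance (alerts : List (List (String × String))) (out : String) : Decidable (Spec_render_alerts_html alerts out) := by unfold Spec_render_alerts_html; infer_instance

-- ===== CLAIM (what is proved, stated in full; the proofs are below) =====
def Claim_equal_render_alerts_html : Prop := ∀ (alerts : List (List (String × String))), Dom_render_alerts_html alerts → Spec_render_alerts_html alerts (render_alerts_html alerts)

-- ===== LEMMAS AND PROOFS =====

-- single-character-pattern str.replace is a per-character flatMap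
theorem replace_go_single (o : Char) (new : List Char) :
    ∀ (l : List Char) (fuel : Nat) (acc : List Char), l.length ≤ fuel →
      PySem.Chars.replace.go [o] new fuel l acc =
        acc.reverse ++ l.flatMap (fun c => if c = o then new else [c]) := by
  intro l
  induction l with
  | nil =>
    intro fuel acc _
    cases fuel <;> simp [PySem.Chars.replace.go]
  | cons c t ih =>
    intro fuel acc h
    cases fuel with
    | zero => simp at h
    | succ fuel =>
      have ht : t.length ≤ fuel := by simpa using h
      by_cases hc : c = o
      · subst hc
        simp [PySem.Chars.replace.go, List.isPrefixOf, ih fuel (new.reverse ++ acc) ht]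
      · have hpre : ([o].isPrefixOf (c :: t)) = false := by
          simp [List.isPrefixOf]
          exact fun h' => (hc h'.symm).elim
        simp [PySem.Chars.replace.go, hpre, ih fuel (c :: acc) ht, hc]

theorem replace_single (s : List Char) (o : Char) (new : List Char) :
    PySem.Chars.replace s [o] new = s.flatMap (fun c => if c = o then new else [c]) := by
  simp [PySem.Chars.replace, replace_go_single o new s s.length [] (le_refl _)]

-- the five chained passes collapse to one per-character pass
theorem html_escape_eq (s : String) :
    (html_escape s).toList = s.toList.flatMap (fun c => (pvEscChar c).toList) := by
  unfold html_escape
  have e1 : "&".toList = ['&'] := rfl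
  have e2 : "<".toList = ['<'] := rfl
  have e3 : ">".toList = ['>'] := rfl
  have e4 : "\"".toList = ['"'] := rfl
  have e5 : "'".toList = ['\''] := rfl
  simp only [PySem.Str.toList_replace, e1, e2, e3, e4, e5]
  simp only [replace_single]
  simp only [List.flatMap_assoc]
  apply List.flatMap_congr
  intro c _
  by_cases h1 : c = '&'
  · subst h1; decide
  by_cases h2 : c = '<'
  · subst h2; decide
  by_cases h3 : c = '>'
  · subst h3; decide
  by_cases h4 : c = '"'
  · subst h4; decide
  by_cases h5 : c = '\''
  · subst h5; decide
  simp [h1, h2, h3, h4, h5, pvEscChar, String.toList_ofList]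

theorem join_nil_eq_flatten (l : List (List Char)) :
    PySem.Chars.join [] l = l.flatten := by
  induction l with
  | nil => simp [PySem.Chars.join_nil]
  | cons p rest ih =>
    cases rest with
    | nil => simp [PySem.Chars.join_singleton]
    | cons q r =>
      rw [PySem.Chars.join_cons_cons]
      simp [ih]

theorem escape_eq (s : String) : pvEscape s = html_escape s := by
  rw [← String.toList_inj]
  rw [html_escape_eq]
  unfold pvEscape
  rw [PySem.Str.toList_join]
  have e0 : "".toList = ([] : List Char) := rfl
  rw [e0, join_nil_eq_flatten]
  simp only [List.flatMap]
  congr 1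
  simp [Function.comp]

-- one alert's cells, B-style, concatenate to A's row string
set_option maxRecDepth 8000 in
theorem row_eq (a : List (String × String)) :
    "<tr>".toList ++ (List.map (fun c => (pvCell a c).toList) pvCols).flatten ++ "</tr>".toList
      = (pvRowA a).toList := by
  simp only [pvCols, List.map, List.flatten, pvCell, pvRowA, ← escape_eq]
  simp [String.toList_append]

theorem rows_eq (alerts : List (List (String × String))) :
    (List.map String.toList (List.flatMap (fun a => [pvRowA a]) alerts)).flatten
      = (List.map String.toList (List.flatMap (fun a => ["<tr>"] ++ List.map (pvCell a) pvCols ++ ["</tr>"]) alerts)).flatten := by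
  induction alerts with
  | nil => simp
  | cons a t ih =>
    simp only [List.flatMap_cons, List.map_append, List.map_cons, List.map_nil,
      List.flatten_append, List.flatten_cons, List.flatten_nil, List.append_nil, List.map_map]
    rw [← ih]
    have hr := row_eq a
    simp only [Function.comp_def]
    rw [← hr]

theorem render_alerts_html_eq (alerts : List (List (String × String))) :
    render_alerts_html alerts = render_alerts_html_alt alerts := by
  unfold render_alerts_html render_alerts_html_alt
  by_cases h : alerts = []
  · simp [h]
  · simp only [h, if_false]
    rw [← String.toList_inj]
    have hA := PySem.List.foldl_append_eq_flatMap (fun a => [pvRowA a]) alerts []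
    have hB : alerts.foldl (fun out a => ((out ++ ["<tr>"]) ++ pvCols.map (pvCell a)) ++ ["</tr>"]) [pvHeadB]
        = [pvHeadB] ++ alerts.flatMap (fun a => (["<tr>"] ++ pvCols.map (pvCell a)) ++ ["</tr>"]) := by
      have hstep : (fun (out : List String) a => ((out ++ ["<tr>"]) ++ pvCols.map (pvCell a)) ++ ["</tr>"])
          = fun (out : List String) a => out ++ ((["<tr>"] ++ pvCols.map (pvCell a)) ++ ["</tr>"]) := by
        funext out a; simp
      rw [hstep, PySem.List.foldl_append_eq_flatMap]
    have hHead : pvHeadB = pvHead := rfl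
    rw [hA, hB, hHead]
    have e0 : "".toList = ([] : List Char) := rfl
    simp only [String.toList_append, PySem.Str.toList_join, e0, join_nil_eq_flatten,
      List.nil_append, List.map_append, List.map_cons, List.map_nil,
      List.flatten_append, List.flatten_cons, List.flatten_nil, List.append_nil]
    rw [rows_eq alerts]

-- ===== VERDICT (by name: the statement is the Claim_ definition above) =====
theorem render_alerts_html_spec : Claim_equal_render_alerts_html := by
  intro alerts _
  unfold Spec_render_alerts_html
  exact render_alerts_html_eq alerts
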